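-- pv_equiv track=rewrite | github.com/SamuelFolledo/CS1.3-Core-Data-Structures-And-Algorithms | classwork/Palindromes-and-Strings/strings.py | contains_recursively
-- ===== SOURCE A (Python) =====
-- def contains_recursively(text_arr, pattern_arr, text_index=0, pattern_index=0):
--     if text_index == len(text_arr): #if text_index go out of bounds, return False
--         return False
--     if text_arr[text_index] != pattern_arr[pattern_index]: #check if characters does not match, pattern_index = 0
--         pattern_index = 0
--     if text_arr[text_index] == pattern_arr[pattern_index]: #if text char match with pattern char, move to next character
--         pattern_index += 1
--         if pattern_index == len(pattern_arr): #if the entire pattern char matches, return True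
--             return True
--     return contains_recursively(text_arr, pattern_arr, text_index+1, pattern_index)
-- ===== SOURCE B (Python) =====
-- def contains_recursively(text_arr, pattern_arr, text_index=0, pattern_index=0):
--     while text_index != len(text_arr):
--         if text_arr[text_index] != pattern_arr[pattern_index]:
--             pattern_index = 0
--         if text_arr[text_index] == pattern_arr[pattern_index]:
--             pattern_index += 1
--             if pattern_index == len(pattern_arr):
--                 return True
--         text_index += 1
--     return False
-- ===== Notes on version B (the rewrite author's own statement) =====
-- stated objective: simpler
-- what changed: Replaced the tail recursion with an iterative while loop over text_index (same mismatch/match checks in the same order), avoiding RecursionError on long texts.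
import Mathlib
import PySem

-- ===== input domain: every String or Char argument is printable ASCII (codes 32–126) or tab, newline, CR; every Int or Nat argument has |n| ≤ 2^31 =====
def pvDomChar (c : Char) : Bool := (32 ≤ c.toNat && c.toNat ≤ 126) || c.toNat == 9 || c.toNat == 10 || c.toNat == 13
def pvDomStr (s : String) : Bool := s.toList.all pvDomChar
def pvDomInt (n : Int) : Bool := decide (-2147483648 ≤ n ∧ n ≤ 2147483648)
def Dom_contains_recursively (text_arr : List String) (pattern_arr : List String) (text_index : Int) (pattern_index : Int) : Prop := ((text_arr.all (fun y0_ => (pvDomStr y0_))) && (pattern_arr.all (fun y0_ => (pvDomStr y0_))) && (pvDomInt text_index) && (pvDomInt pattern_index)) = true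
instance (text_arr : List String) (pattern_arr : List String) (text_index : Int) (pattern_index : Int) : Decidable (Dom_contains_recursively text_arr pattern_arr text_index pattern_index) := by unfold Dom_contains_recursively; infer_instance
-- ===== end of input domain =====

-- B replaces A's tail recursion by an iterative scan over the remaining text indices (same check order); objective: simpler (no RecursionError on long texts), same O(n) cost.


-- ===== PORT A =====
-- Literal port of A's tail recursion; the InRange guards are exactly where Python's indexing raises IndexError (excluded by Pre_); the port returns false there.
def contains_recursively (text_arr : List String) (pattern_arr : List String) (text_index : Int) (pattern_index : Int) : Bool :=
  if text_index = (text_arr.length : Int) then false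
  else if hin : PySem.Raise.InRange text_arr.length text_index then
    if PySem.Raise.InRange pattern_arr.length pattern_index then
      let c := PySem.List.pyGetD text_arr text_index ""
      let p0 := PySem.List.pyGetD pattern_arr pattern_index ""
      let pi := if c ≠ p0 then 0 else pattern_index
      if PySem.Raise.InRange pattern_arr.length pi then
        let p1 := PySem.List.pyGetD pattern_arr pi ""
        if c = p1 then
          if pi + 1 = (pattern_arr.length : Int) then true
          else contains_recursively text_arr pattern_arr (text_index + 1) (pi + 1)
        else contains_recursively text_arr pattern_arr (text_index + 1) pi
      else false  -- IndexError
    else false  -- IndexError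
  else false  -- IndexError
termination_by ((text_arr.length : Int) - text_index).toNat
decreasing_by
  all_goals
    · obtain ⟨_, hr⟩ := hin
      omega

-- ===== PORT B =====
-- One iteration of Source B's while-loop body: state = some pattern_index, or none once the loop has returned True.
def crLoopStep (text_arr : List String) (pattern_arr : List String) : Option Int → Int → Option Int :=
  fun st i =>
    match st with
    | none => none
    | some pattern_index =>
      let c := PySem.List.pyGetD text_arr i ""
      let pi := if c ≠ PySem.List.pyGetD pattern_arr pattern_index "" then 0 else pattern_index
      if c = PySem.List.pyGetD pattern_arr pi "" then
        if pi + 1 = (pattern_arr.length : Int) then none else some (pi + 1)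
      else some pi

def contains_recursively_alt (text_arr : List String) (pattern_arr : List String) (text_index : Int) (pattern_index : Int) : Bool :=
  ((PySem.List.pyRange text_index (text_arr.length : Int) 1).foldl
    (crLoopStep text_arr pattern_arr) (some pattern_index)).isNone

-- ===== PRECONDITION & SPEC =====
-- Pre_ is exactly where Python A returns: either text_index == len(text_arr) (immediate False), or both
-- starting indices are in Python's index range; outside it A raises IndexError (negative wraparound is in range and kept).
def Pre_contains_recursively (text_arr : List String) (pattern_arr : List String) (text_index : Int) (pattern_index : Int) : Prop :=
  text_index = (text_arr.length : Int) ∨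
  (-(text_arr.length : Int) ≤ text_index ∧ text_index ≤ (text_arr.length : Int) ∧
   -(pattern_arr.length : Int) ≤ pattern_index ∧ pattern_index < (pattern_arr.length : Int))
instance (text_arr : List String) (pattern_arr : List String) (text_index : Int) (pattern_index : Int) : Decidable (Pre_contains_recursively text_arr pattern_arr text_index pattern_index) := by unfold Pre_contains_recursively; infer_instance

def pvWitness_contains_recursively : List String × List String × Int × Int := (["a", "b"], ["b"], 0, 0)

def Spec_contains_recursively (text_arr : List String) (pattern_arr : List String) (text_index : Int) (pattern_index : Int) (out : Bool) : Prop := out = contains_recursively_alt text_arr pattern_arr text_index pattern_index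
instance (text_arr : List String) (pattern_arr : List String) (text_index : Int) (pattern_index : Int) (out : Bool) : Decidable (Spec_contains_recursively text_arr pattern_arr text_index pattern_index out) := by unfold Spec_contains_recursively; infer_instance

-- ===== CLAIM (what is proved, stated in full; the proofs are below) =====
def Claim_equal_contains_recursively : Prop := ∀ (text_arr : List String) (pattern_arr : List String) (text_index : Int) (pattern_index : Int), Dom_contains_recursively text_arr pattern_arr text_index pattern_index → Pre_contains_recursively text_arr pattern_arr text_index pattern_index → Spec_contains_recursively text_arr pattern_arr text_index pattern_index (contains_recursively text_arr pattern_arr text_index pattern_index)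

-- ===== LEMMAS AND PROOFS =====

-- once the loop has "returned True" (state none), the remaining iterations keep it none
theorem crLoopStep_none (text_arr pattern_arr : List String) (l : List Int) :
    l.foldl (crLoopStep text_arr pattern_arr) none = none := by
  induction l with
  | nil => rfl
  | cons x xs ih => simpa [crLoopStep] using ih

theorem cr_eq (text_arr pattern_arr : List String) :
    ∀ (n : Nat) (ti pi : Int), ((text_arr.length : Int) - ti).toNat = n →
    -(text_arr.length : Int) ≤ ti → ti ≤ (text_arr.length : Int) →
    -(pattern_arr.length : Int) ≤ pi → pi < (pattern_arr.length : Int) →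
    contains_recursively text_arr pattern_arr ti pi =
      contains_recursively_alt text_arr pattern_arr ti pi := by
  intro n
  induction n with
  | zero =>
    intro ti pi h0 h1 h2 h3 h4
    have hti : ti = (text_arr.length : Int) := by omega
    subst hti
    simp [contains_recursively, contains_recursively_alt]
  | succ n ih =>
    intro ti pi h0 h1 h2 h3 h4
    have hlt : ti < (text_arr.length : Int) := by omega
    have hplen : 1 ≤ (pattern_arr.length : Int) := by omega
    have hne : ti ≠ (text_arr.length : Int) := by omega
    set c := PySem.List.pyGetD text_arr ti "" with hc
    set p0 := PySem.List.pyGetD pattern_arr pi "" with hp0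
    set pi' := (if c ≠ p0 then 0 else pi) with hpi'
    have hpi'lo : -(pattern_arr.length : Int) ≤ pi' := by rw [hpi']; split <;> omega
    have hpi'hi : pi' < (pattern_arr.length : Int) := by rw [hpi']; split <;> omega
    set p1 := PySem.List.pyGetD pattern_arr pi' "" with hp1
    have hrange : PySem.List.pyRange ti (text_arr.length : Int) 1 =
        ti :: PySem.List.pyRange (ti + 1) (text_arr.length : Int) 1 :=
      PySem.List.pyRange_one_cons hlt
    have hinT : PySem.Raise.InRange text_arr.length ti := ⟨h1, hlt⟩
    have hinP : PySem.Raise.InRange pattern_arr.length pi := ⟨h3, h4⟩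
    have hinP' : PySem.Raise.InRange pattern_arr.length pi' := ⟨hpi'lo, hpi'hi⟩
    rw [contains_recursively]
    rw [if_neg hne, dif_pos hinT, if_pos hinP, if_pos hinP']
    simp only [← hc, ← hp0]
    simp only [← hpi']
    simp only [← hp1]
    unfold contains_recursively_alt
    rw [hrange]
    simp only [List.foldl_cons]
    have hstep : crLoopStep text_arr pattern_arr (some pi) ti =
        (if c = p1 then (if pi' + 1 = (pattern_arr.length : Int) then none else some (pi' + 1))
         else some pi') := by
      simp only [crLoopStep, ← hc, ← hp0, ← hpi', ← hp1]
    rw [hstep]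
    by_cases hm : c = p1
    · rw [if_pos hm, if_pos hm]
      by_cases hend : pi' + 1 = (pattern_arr.length : Int)
      · rw [if_pos hend, if_pos hend, crLoopStep_none]; rfl
      · rw [if_neg hend, if_neg hend]
        exact ih (ti + 1) (pi' + 1) (by omega) (by omega) (by omega) (by omega) (by omega)
    · rw [if_neg hm, if_neg hm]
      exact ih (ti + 1) pi' (by omega) (by omega) (by omega) hpi'lo hpi'hi

-- ===== VERDICT (by name: the statement is the Claim_ definition above) =====
theorem contains_recursively_spec : Claim_equal_contains_recursively := by
  intro text_arr pattern_arr text_index pattern_index _ hpre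
  unfold Spec_contains_recursively
  rcases hpre with h | ⟨h1, h2, h3, h4⟩
  · subst h
    simp [contains_recursively, contains_recursively_alt]
  · exact cr_eq text_arr pattern_arr (((text_arr.length : Int) - text_index).toNat)
      text_index pattern_index rfl h1 h2 h3 h4
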